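-- pv_equiv track=rewrite | github.com/GuangyuanZhao/ee239as | sensitivity.py | adjust_bad_frames
-- ===== SOURCE A (Python) =====
-- def adjust_bad_frames(cuts, bad_frames_by_video):
--     bad_frames = []
--     for i,c,bfs in zip(range(len(cuts)),cuts,bad_frames_by_video):
--         for a,b in bfs:
--             #deal with negative and None indexes if we're not in the last cut
--             #None means "through end of video" in this case
--             if i < len(cuts) - 1:
--                 if a < 0: a = cuts[i+1] + a
--                 if b is None: b = cuts[i+1] - cuts[i]
--                 elif b < 0: b = cuts[i+1] + b - cuts[i]
--             if a >= 0: a += c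
--             if b is not None and b >= 0: b += c
--             if bad_frames and bad_frames[-1][1] == a:
--                 bad_frames[-1][1] = b
--             else:
--                 bad_frames.append([a,b])
--     return bad_frames
-- ===== SOURCE B (Python) =====
-- def adjust_bad_frames(cuts, bad_frames_by_video):
--     # rebase one raw interval against its own cut c and the next cut boundary (None = last cut)
--     def adjust(c, nxt, a, b):
--         if nxt is not None:
--             if a < 0: a = nxt + a
--             if b is None: b = nxt - c
--             elif b < 0: b = nxt + b - c
--         if a >= 0: a += c
--         if b is not None and b >= 0: b += c
--         return (a, b)
--
--     nexts = [cuts[i + 1] if i + 1 < len(cuts) else None for i in range(len(cuts))]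
--     pairs = [adjust(c, nxt, a, b)
--              for c, nxt, bfs in zip(cuts, nexts, bad_frames_by_video)
--              for a, b in bfs]
--
--     # greedy run extraction: emit one merged interval per maximal chain
--     # (each interval's start equal to the running end), then recurse on the rest
--     def merge(ps):
--         if not ps:
--             return []
--         a, b = ps[0]
--         i = 1
--         while i < len(ps) and ps[i][0] == b:
--             b = ps[i][1]
--             i += 1
--         return [[a, b]] + merge(ps[i:])
--
--     return merge(pairs)
-- ===== Notes on version B (the rewrite author's own statement) =====
-- stated objective: alternative
-- what changed: A's single fused loop with an in-place mutate-the-last-interval merge is replaced by a rebasing comprehension over zip(cuts, nexts) followed by a recursive greedy run extraction: each call consumes one maximal chain of adjacent intervals (start == running end) and emits a single merged interval, with no accumulator or mutation.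
import Mathlib
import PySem

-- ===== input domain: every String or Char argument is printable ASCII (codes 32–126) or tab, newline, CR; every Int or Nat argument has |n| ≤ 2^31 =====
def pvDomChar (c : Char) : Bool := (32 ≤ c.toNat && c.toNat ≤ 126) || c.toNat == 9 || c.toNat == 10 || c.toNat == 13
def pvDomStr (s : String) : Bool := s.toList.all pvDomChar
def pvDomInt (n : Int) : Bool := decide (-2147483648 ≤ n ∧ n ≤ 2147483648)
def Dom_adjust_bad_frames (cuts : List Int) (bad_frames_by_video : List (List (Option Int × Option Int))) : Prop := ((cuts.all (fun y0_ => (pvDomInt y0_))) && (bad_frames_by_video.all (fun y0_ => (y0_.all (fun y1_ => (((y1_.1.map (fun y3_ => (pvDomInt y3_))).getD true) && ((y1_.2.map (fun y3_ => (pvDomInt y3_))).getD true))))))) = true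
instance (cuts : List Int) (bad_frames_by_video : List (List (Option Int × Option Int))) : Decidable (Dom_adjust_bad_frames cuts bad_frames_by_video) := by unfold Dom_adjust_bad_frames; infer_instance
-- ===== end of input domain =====

-- B replaces A's fused loop (in-place extend-the-last-interval merge) by a rebasing pass over
-- zip(cuts, nexts) followed by a recursive greedy extraction of maximal chains; objective:
-- alternative decomposition, same cost.

-- ===== PORT A =====
-- adjusted start/end of one interval, exactly A's if-chain (i, c from the zip; cuts indexed globally)
def pvAdjA (cuts : List Int) (i : Int) (c : Int) (a0 : Int) (b0 : Option Int) : Int × Option Int :=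
  let a1 : Int := if i < (cuts.length : Int) - 1 ∧ a0 < 0 then cuts.getD (i + 1).toNat 0 + a0 else a0
  let b1 : Option Int :=
    if i < (cuts.length : Int) - 1 then
      match b0 with
      | none => some (cuts.getD (i + 1).toNat 0 - cuts.getD i.toNat 0)
      | some b => if b < 0 then some (cuts.getD (i + 1).toNat 0 + b - cuts.getD i.toNat 0) else some b
    else b0
  let a2 : Int := if 0 ≤ a1 then a1 + c else a1
  let b2 : Option Int := match b1 with
    | some b => if 0 ≤ b then some (b + c) else some b
    | none => none
  (a2, b2)

-- one iteration of A's inner loop: adjust, then append or overwrite the last end in place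
-- (a = none makes the Python raise TypeError; excluded by Pre_, the port leaves the state unchanged)
def pvStepA (cuts : List Int) (i : Int) (c : Int)
    (bad_frames : List (List (Option Int))) (p : Option Int × Option Int) : List (List (Option Int)) :=
  match p.1 with
  | none => bad_frames
  | some a0 =>
    let ab := pvAdjA cuts i c a0 p.2
    match bad_frames.getLast? with
    | some last =>
        if last.getD 1 none = some ab.1 then
          bad_frames.dropLast ++ [[last.getD 0 none, ab.2]]
        else bad_frames ++ [[some ab.1, ab.2]]
    | none => bad_frames ++ [[some ab.1, ab.2]]

def adjust_bad_frames (cuts : List Int) (bad_frames_by_video : List (List (Option Int × Option Int))) : List (List (Option Int)) :=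
  (PySem.List.enumerate (cuts.zip bad_frames_by_video)).foldl
    (fun bad_frames x => x.2.2.foldl (pvStepA cuts x.1 x.2.1) bad_frames) []

-- ===== PORT B =====
-- rebase one interval against its own cut c and the next cut boundary (none = last cut)
def pvAdjB (c : Int) (nxt : Option Int) (a0 : Int) (b0 : Option Int) : Int × Option Int :=
  let a1 : Int := match nxt with
    | some nx => if a0 < 0 then nx + a0 else a0
    | none => a0
  let b1 : Option Int := match nxt with
    | some nx =>
        (match b0 with
         | none => some (nx - c)
         | some b => if b < 0 then some (nx + b - c) else some b)
    | none => b0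
  let a2 : Int := if 0 ≤ a1 then a1 + c else a1
  let b2 : Option Int := match b1 with
    | some b => if 0 ≤ b then some (b + c) else some b
    | none => none
  (a2, b2)

-- nexts = [cuts[i+1] if i+1 < len(cuts) else None for i in range(len(cuts))]
def pvNexts (cuts : List Int) : List (Option Int) :=
  (List.range cuts.length).map (fun i => if i + 1 < cuts.length then some (cuts.getD (i + 1) 0) else none)

-- the flat comprehension of rebased pairs (a = none raises in Python; excluded by Pre_, skipped here)
def pvAdjusted (cuts : List Int) (bad_frames_by_video : List (List (Option Int × Option Int))) : List (Int × Option Int) :=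
  ((cuts.zip (pvNexts cuts)).zip bad_frames_by_video).flatMap (fun x =>
    x.2.filterMap (fun p => p.1.map (fun a0 => pvAdjB x.1.1 x.1.2 a0 p.2)))

-- the inner while loop of merge: consume the maximal chain (start = running end), return final end + rest
def pvTakeRun : Option Int → List (Int × Option Int) → Option Int × List (Int × Option Int)
  | b, [] => (b, [])
  | b, p :: rest => if b = some p.1 then pvTakeRun p.2 rest else (b, p :: rest)

theorem pvTakeRun_length : ∀ (b : Option Int) (l : List (Int × Option Int)),
    (pvTakeRun b l).2.length ≤ l.length := by
  intro b l
  induction l generalizing b with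
  | nil => simp [pvTakeRun]
  | cons p rest ih =>
    simp only [pvTakeRun]
    split
    · exact Nat.le_succ_of_le (ih p.2)
    · simp

-- merge(ps): emit one merged interval per maximal chain, recurse on the remainder
def pvMergeRuns : List (Int × Option Int) → List (List (Option Int))
  | [] => []
  | p :: rest =>
    let br := pvTakeRun p.2 rest
    [some p.1, br.1] :: pvMergeRuns br.2
termination_by l => l.length
decreasing_by exact Nat.lt_succ_of_le (pvTakeRun_length _ _)

def adjust_bad_frames_alt (cuts : List Int) (bad_frames_by_video : List (List (Option Int × Option Int))) : List (List (Option Int)) :=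
  pvMergeRuns (pvAdjusted cuts bad_frames_by_video)

-- ===== PRECONDITION & SPEC =====
-- Pre_ excludes inputs where some interval start `a` is None in a video the zip actually visits:
-- there the Python A (and B) raise TypeError (None < 0 / None >= 0).
def Pre_adjust_bad_frames (cuts : List Int) (bad_frames_by_video : List (List (Option Int × Option Int))) : Prop :=
  ∀ bfs ∈ bad_frames_by_video.take cuts.length, ∀ p ∈ bfs, p.1 ≠ none
instance (cuts : List Int) (bad_frames_by_video : List (List (Option Int × Option Int))) : Decidable (Pre_adjust_bad_frames cuts bad_frames_by_video) := by unfold Pre_adjust_bad_frames; infer_instance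
def pvWitness_adjust_bad_frames : List Int × (List (List (Option Int × Option Int))) :=
  ([0, 10, 25], [[(some 2, some 4), (some (-3), none)], [(some 0, some 4)], [(some 1, none)]])
def Spec_adjust_bad_frames (cuts : List Int) (bad_frames_by_video : List (List (Option Int × Option Int))) (out : List (List (Option Int))) : Prop := out = adjust_bad_frames_alt cuts bad_frames_by_video
instance (cuts : List Int) (bad_frames_by_video : List (List (Option Int × Option Int))) (out : List (List (Option Int))) : Decidable (Spec_adjust_bad_frames cuts bad_frames_by_video out) := by unfold Spec_adjust_bad_frames; infer_instance

-- ===== CLAIM (what is proved, stated in full; the proofs are below) =====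
def Claim_equal_adjust_bad_frames : Prop := ∀ (cuts : List Int) (bad_frames_by_video : List (List (Option Int × Option Int))), Dom_adjust_bad_frames cuts bad_frames_by_video → Pre_adjust_bad_frames cuts bad_frames_by_video → Spec_adjust_bad_frames cuts bad_frames_by_video (adjust_bad_frames cuts bad_frames_by_video)

-- ===== LEMMAS AND PROOFS =====

-- A's append-or-extend merge step, factored out of pvStepA for the proof
def pvMergeStepA (merged : List (List (Option Int))) (p : Int × Option Int) : List (List (Option Int)) :=
  match merged.getLast? with
  | some last =>
      if last.getD 1 none = some p.1 then
        merged.dropLast ++ [[last.getD 0 none, p.2]]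
      else merged ++ [[some p.1, p.2]]
  | none => merged ++ [[some p.1, p.2]]

theorem pvStepA_eq_merge (cuts : List Int) (i : Int) (c : Int)
    (bad : List (List (Option Int))) (a0 : Int) (b0 : Option Int) :
    pvStepA cuts i c bad (some a0, b0) = pvMergeStepA bad (pvAdjA cuts i c a0 b0) := by
  unfold pvStepA pvMergeStepA
  rfl

-- A's inner loop equals folding the merge step over the adjusted (filterMapped) pairs
theorem inner_foldl_eq (cuts : List Int) (i : Int) (c : Int)
    (bfs : List (Option Int × Option Int)) (bad : List (List (Option Int))) :
    bfs.foldl (pvStepA cuts i c) bad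
      = (bfs.filterMap (fun p => p.1.map (fun a0 => pvAdjA cuts i c a0 p.2))).foldl pvMergeStepA bad := by
  induction bfs generalizing bad with
  | nil => rfl
  | cons p rest ih =>
    cases p with
    | mk a0 b0 =>
      cases a0 with
      | none => simpa [List.filterMap_cons, pvStepA] using ih bad
      | some a => simp [pvStepA_eq_merge, ih]

-- a nested foldl over per-element lists is a foldl over the flatMap
theorem foldl_flatMap {α β γ : Type} (f : γ → β → γ) (g : α → List β) (l : List α) (init : γ) :
    l.foldl (fun acc x => (g x).foldl f acc) init = (l.flatMap g).foldl f init := by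
  induction l generalizing init with
  | nil => rfl
  | cons x rest ih => simp [List.flatMap_cons, List.foldl_append, ih]

-- pvNexts, elementwise
theorem nexts_getElem (cuts : List Int) (k : Nat) (hk : k < cuts.length) :
    (pvNexts cuts)[k]'(by simp [pvNexts]; omega)
      = if k + 1 < cuts.length then some (cuts.getD (k + 1) 0) else none := by
  simp [pvNexts]

-- the two adjustment helpers agree when nxt is the successor cut
theorem adjA_eq_adjB (cuts : List Int) (k : Nat) (hk : k < cuts.length)
    (a0 : Int) (b0 : Option Int) :
    pvAdjA cuts (k : Int) (cuts.getD k 0) a0 b0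
      = pvAdjB (cuts.getD k 0) (if k + 1 < cuts.length then some (cuts.getD (k + 1) 0) else none) a0 b0 := by
  have hlt : ((k : Int) < (cuts.length : Int) - 1) ↔ (k + 1 < cuts.length) := by omega
  by_cases h : k + 1 < cuts.length
  · have h1 : ((k : Int) + 1).toNat = k + 1 := by omega
    have h2 : ((k : Int)).toNat = k := by omega
    simp only [pvAdjA, pvAdjB, hlt, h, if_true, true_and, h1, h2]
  · simp only [pvAdjA, pvAdjB, hlt, h, if_false, false_and]

-- the per-video adjusted lists of the two ports coincide
theorem map_adj_eq (cuts : List Int) (bfbv : List (List (Option Int × Option Int))) :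
    (PySem.List.enumerate (cuts.zip bfbv)).map
        (fun x => x.2.2.filterMap (fun p => p.1.map (fun a0 => pvAdjA cuts x.1 x.2.1 a0 p.2)))
      = ((cuts.zip (pvNexts cuts)).zip bfbv).map
        (fun x => x.2.filterMap (fun p => p.1.map (fun a0 => pvAdjB x.1.1 x.1.2 a0 p.2))) := by
  apply List.ext_getElem
  · simp [PySem.List.length_enumerate, pvNexts]
  · intro k h1 h2
    simp only [List.getElem_map]
    have hk : k < cuts.length := by
      simp [PySem.List.length_enumerate] at h1; omega
    rw [PySem.List.getElem_enumerate]
    simp only [List.getElem_zip]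
    apply List.filterMap_congr
    intro p _
    cases p with
    | mk a0 b0 =>
      cases a0 with
      | none => rfl
      | some a =>
        simp only [Option.map_some]
        rw [nexts_getElem cuts k hk]
        have hg : cuts[k] = cuts.getD k 0 := by
          simp [List.getD_eq_getElem?_getD, hk]
        rw [show (0 : Int) + (k : Int) = (k : Int) by omega, hg]
        exact congrArg some (adjA_eq_adjB cuts k hk a b0)

-- folding A's merge step from a non-empty accumulator is extracting the run of the last interval
theorem foldl_merge_concat : ∀ (pairs : List (Int × Option Int)) (done : List (List (Option Int)))
    (la : Option Int) (lb : Option Int),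
    pairs.foldl pvMergeStepA (done ++ [[la, lb]])
      = done ++ [la, (pvTakeRun lb pairs).1] :: pvMergeRuns (pvTakeRun lb pairs).2 := by
  intro pairs
  induction pairs with
  | nil =>
    intro done la lb
    rw [List.foldl_nil]
    simp [pvTakeRun, pvMergeRuns]
  | cons p rest ih =>
    intro done la lb
    by_cases h : lb = some p.1
    · subst h
      have hstep : pvMergeStepA (done ++ [[la, some p.1]]) p = done ++ [[la, p.2]] := by
        simp [pvMergeStepA]
      rw [List.foldl_cons, hstep, ih done la p.2]
      simp [pvTakeRun]
    · have hstep : pvMergeStepA (done ++ [[la, lb]]) p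
          = (done ++ [[la, lb]]) ++ [[some p.1, p.2]] := by
        simp [pvMergeStepA, h]
      rw [List.foldl_cons, hstep, ih (done ++ [[la, lb]]) (some p.1) p.2]
      rw [show pvTakeRun lb (p :: rest) = (lb, p :: rest) from by simp [pvTakeRun, h]]
      rw [pvMergeRuns]
      simp

-- A's merge fold from the empty accumulator equals B's recursive run extraction
theorem foldl_merge_eq_runs (pairs : List (Int × Option Int)) :
    pairs.foldl pvMergeStepA [] = pvMergeRuns pairs := by
  cases pairs with
  | nil => simp [pvMergeRuns]
  | cons p rest =>
    have hstep : pvMergeStepA [] p = [] ++ [[some p.1, p.2]] := by rfl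
    rw [List.foldl_cons, hstep, foldl_merge_concat rest [] (some p.1) p.2, pvMergeRuns]
    simp

-- ===== VERDICT (by name: the statement is the Claim_ definition above) =====
theorem adjust_bad_frames_spec : Claim_equal_adjust_bad_frames := by
  intro cuts bfbv _hDom _hPre
  show adjust_bad_frames cuts bfbv = adjust_bad_frames_alt cuts bfbv
  unfold adjust_bad_frames adjust_bad_frames_alt pvAdjusted
  rw [show (fun (bad : List (List (Option Int))) (x : Int × Int × List (Option Int × Option Int)) =>
        x.2.2.foldl (pvStepA cuts x.1 x.2.1) bad)
      = (fun bad x => (x.2.2.filterMap (fun p => p.1.map (fun a0 => pvAdjA cuts x.1 x.2.1 a0 p.2))).foldl pvMergeStepA bad)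
      from funext fun bad => funext fun x => inner_foldl_eq cuts x.1 x.2.1 x.2.2 bad]
  rw [foldl_flatMap, List.flatMap_def, map_adj_eq, ← List.flatMap_def]
  exact foldl_merge_eq_runs _
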